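-- pv_equiv track=rewrite | github.com/bica-tools/reticulate | reticulate/audio_routing.py | _build_chain_type
-- ===== SOURCE A (Python) =====
-- def _sanitize_label(name: str) -> str:
--     """Sanitize a node/route name for use as a session type label.
--
--     Replaces characters that conflict with the session type grammar.
--     """
--     s = name.replace(" ", "_").replace("-", "_")
--     # Ensure it starts with a letter
--     if s and not s[0].isalpha():
--         s = "n" + s
--     return s
--
-- def _build_chain_type(effects: list[str]) -> str:
--     """Build a sequential chain session type from a list of effect labels.
--
--     Example: ["eq", "comp", "limit"] → "&{eq: &{comp: &{limit: end}}}"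
--     """
--     if not effects:
--         return "end"
--     result = "end"
--     for eff in reversed(effects):
--         label = _sanitize_label(eff)
--         result = f"&{{{label}: {result}}}"
--     return result
-- ===== SOURCE B (Python) =====
-- def _sanitize_label(name: str) -> str:
--     s = name.replace(" ", "_").replace("-", "_")
--     if s and not s[0].isalpha():
--         s = "n" + s
--     return s
--
-- def _build_chain_type(effects: list[str]) -> str:
--     if not effects:
--         return "end"
--     labels = [_sanitize_label(e) for e in effects]
--     return "&{" + ": &{".join(labels) + ": end" + "}" * len(labels)
-- ===== Notes on version B (the rewrite author's own statement) =====
-- stated objective: faster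
-- what changed: Replaces the reversed-order incremental prefix-wrapping loop with a closed-form assembly: sanitize all labels in one comprehension, then join them with ': &{' and append ': end' plus len(labels) closing braces.
import Mathlib
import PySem

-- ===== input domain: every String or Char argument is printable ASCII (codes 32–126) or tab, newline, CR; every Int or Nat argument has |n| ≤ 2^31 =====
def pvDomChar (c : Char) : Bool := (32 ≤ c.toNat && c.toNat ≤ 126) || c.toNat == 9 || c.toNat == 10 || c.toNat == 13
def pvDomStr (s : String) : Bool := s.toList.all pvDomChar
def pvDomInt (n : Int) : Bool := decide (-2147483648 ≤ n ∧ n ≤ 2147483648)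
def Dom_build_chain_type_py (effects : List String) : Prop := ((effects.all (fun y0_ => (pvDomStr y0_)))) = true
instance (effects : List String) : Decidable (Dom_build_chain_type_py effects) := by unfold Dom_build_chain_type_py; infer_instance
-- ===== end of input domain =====

-- B replaces the incremental reversed-loop prefix-wrapping with a closed-form join + '}'*n assembly (objective: faster — avoids re-copying the growing result each iteration).
-- ===== PORT A =====
-- shared helper (Python _sanitize_label, used verbatim by both sources)
def sanitizeLabelPy (name : String) : String :=
  let s := PySem.Str.replace (PySem.Str.replace name " " "_") "-" "_"
  match PySem.Str.pyGet? s 0 with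
  | none => s
  | some c => if PySem.Chars.isalpha c then s else String.ofList ('n' :: s.toList)

def build_chain_type_py (effects : List String) : String :=
  if effects = [] then "end"
  else
    effects.reverse.foldl
      (fun result eff =>
        let label := sanitizeLabelPy eff
        String.ofList ('&' :: '{' :: label.toList ++ ':' :: ' ' :: result.toList ++ ['}']))
      "end"

-- ===== PORT B =====
def build_chain_type_py_alt (effects : List String) : String :=
  if effects = [] then "end"
  else
    let labels := effects.map sanitizeLabelPy
    String.ofList (('&' :: '{' :: PySem.Chars.join (": &{".toList) (labels.map String.toList))
               ++ ": end".toList ++ List.replicate labels.length '}')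

-- ===== PRECONDITION & SPEC =====
def Spec_build_chain_type_py (effects : List String) (out : String) : Prop := out = build_chain_type_py_alt effects
instance (effects : List String) (out : String) : Decidable (Spec_build_chain_type_py effects out) := by unfold Spec_build_chain_type_py; infer_instance

-- ===== CLAIM (what is proved, stated in full; the proofs are below) =====
def Claim_equal_build_chain_type_py : Prop := ∀ (effects : List String), Dom_build_chain_type_py effects → Spec_build_chain_type_py effects (build_chain_type_py effects)

-- ===== LEMMAS AND PROOFS =====

-- A's reversed-loop result, characterised on char lists: foldr wrapping = join + replicated closing braces.
theorem chain_foldr_eq_join (ls : List (List Char)) (h : ls ≠ []) :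
    ls.foldr (fun l r => '&' :: '{' :: l ++ ':' :: ' ' :: r ++ ['}']) ("end".toList)
      = ('&' :: '{' :: PySem.Chars.join (": &{".toList) ls) ++ ": end".toList
          ++ List.replicate ls.length '}' := by
  induction ls with
  | nil => simp at h
  | cons x t ih =>
    cases t with
    | nil => simp [PySem.Chars.join_singleton]
    | cons y u =>
      simp only [List.foldr_cons] at ih ⊢
      rw [ih (by simp), PySem.Chars.join_cons_cons]
      simp [List.replicate_succ']

-- The String-level loop equals the char-list-level foldr on the sanitized labels.
theorem chain_fold_toList (effects : List String) :
    effects.foldr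
        (fun eff result =>
          String.ofList ('&' :: '{' :: (sanitizeLabelPy eff).toList
            ++ ':' :: ' ' :: result.toList ++ ['}'])) "end"
      = String.ofList ((effects.map (fun e => (sanitizeLabelPy e).toList)).foldr
          (fun l r => '&' :: '{' :: l ++ ':' :: ' ' :: r ++ ['}']) ("end".toList)) := by
  induction effects with
  | nil => rfl
  | cons x t ih => simp only [List.foldr_cons, List.map_cons, ih, String.toList_ofList]

theorem build_chain_type_py_eq (effects : List String) :
    build_chain_type_py effects = build_chain_type_py_alt effects := by
  unfold build_chain_type_py build_chain_type_py_alt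
  by_cases h : effects = []
  · simp [h]
  · simp only [if_neg h]
    rw [List.foldl_reverse]
    rw [chain_fold_toList, chain_foldr_eq_join _ (by simpa using h)]
    simp [List.map_map, Function.comp_def]

-- ===== VERDICT (by name: the statement is the Claim_ definition above) =====
theorem build_chain_type_py_spec : Claim_equal_build_chain_type_py := by
  intro effects _
  exact build_chain_type_py_eq effects
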